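-- pv_equiv track=rewrite | github.com/qleverty/Quadshot-Roulette | QuadShot-Roulette.py | add_items_to_inventory
-- ===== SOURCE A (Python) =====
-- INVENTORY_SIZE = 8
--
-- def add_items_to_inventory(inventory: str, new_items: str) -> str:
--     inv_list = list(inventory)
--     for item in new_items:
--         if item == 'x':
--             continue
--         for i in range(INVENTORY_SIZE):
--             if inv_list[i] == 'x':
--                 inv_list[i] = item
--                 break
--     return "".join(inv_list)
-- ===== SOURCE B (Python) =====
-- def add_items_to_inventory(inventory: str, new_items: str) -> str:
--     items = iter(c for c in new_items if c != 'x')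
--     head = [next(items, slot) if slot == 'x' else slot for slot in inventory[:8]]
--     return ''.join(head) + inventory[8:]
-- ===== Notes on version B (the rewrite author's own statement) =====
-- stated objective: faster
-- what changed: B inverts the nesting: it builds an iterator of non-'x' items once and rewrites the first 8 slots in a single comprehension, filling each 'x' slot from the iterator (keeping 'x' when it is exhausted), instead of rescanning the inventory from index 0 for every item.
import Mathlib
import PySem

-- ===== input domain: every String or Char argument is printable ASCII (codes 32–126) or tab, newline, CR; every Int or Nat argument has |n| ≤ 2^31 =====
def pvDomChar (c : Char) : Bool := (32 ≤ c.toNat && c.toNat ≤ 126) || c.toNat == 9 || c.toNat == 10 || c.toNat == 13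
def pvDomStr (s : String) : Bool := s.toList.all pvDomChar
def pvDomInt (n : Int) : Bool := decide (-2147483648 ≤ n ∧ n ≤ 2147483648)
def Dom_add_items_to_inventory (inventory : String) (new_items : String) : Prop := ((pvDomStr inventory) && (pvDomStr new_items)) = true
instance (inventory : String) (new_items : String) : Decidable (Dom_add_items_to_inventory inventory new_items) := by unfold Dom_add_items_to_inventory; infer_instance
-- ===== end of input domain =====

-- B inverts A's nesting: it rewrites the first 8 slots in one pass, filling each 'x' slot
-- from a prebuilt queue of non-'x' items, instead of rescanning the inventory per item.


-- ===== PORT A =====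
-- inner 'for i in range(INVENTORY_SIZE)' of A: scan from index i with the given fuel;
-- none models the IndexError of 'inv_list[i]' when i is out of range.
def pvLoopA : Nat → Nat → List Char → Char → Option (List Char)
  | 0, _, inv, _ => some inv
  | fuel+1, i, inv, item =>
    match inv[i]? with
    | none => none
    | some c => if c = 'x' then some (inv.set i item) else pvLoopA fuel (i+1) inv item

def add_items_to_inventory (inventory : String) (new_items : String) : String :=
  match new_items.toList.foldl
      (fun acc item => if item = 'x' then acc
        else acc.bind (fun l => pvLoopA 8 0 l item))
      (some inventory.toList) with
  | some l => String.ofList l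
  | none => ""   -- IndexError in Python; excluded by Pre_

-- ===== PORT B =====
-- Source B's comprehension over the first-8-slots prefix: the generator of non-'x' items is
-- modelled as a list consumed in order; 'next(items, slot)' keeps the slot when empty.
def pvFillB : List Char → List Char → List Char
  | [], _ => []
  | slot :: slots, items =>
    if slot = 'x' then
      match items with
      | [] => slot :: pvFillB slots []
      | it :: more => it :: pvFillB slots more
    else slot :: pvFillB slots items

def add_items_to_inventory_alt (inventory : String) (new_items : String) : String :=
  String.ofList
    (pvFillB (inventory.toList.take 8) (new_items.toList.filter (fun c => c ≠ 'x'))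
      ++ inventory.toList.drop 8)

-- ===== PRECONDITION & SPEC =====
-- Pre_ holds exactly where Python A returns: A raises IndexError iff the inventory is
-- shorter than 8 and has fewer 'x' slots than there are non-'x' new items.
def Pre_add_items_to_inventory (inventory : String) (new_items : String) : Prop :=
  8 ≤ inventory.toList.length ∨
  (new_items.toList.filter (fun c => c ≠ 'x')).length ≤ (inventory.toList.filter (fun c => c = 'x')).length
instance (inventory : String) (new_items : String) : Decidable (Pre_add_items_to_inventory inventory new_items) := by
  unfold Pre_add_items_to_inventory; infer_instance

def pvWitness_add_items_to_inventory : String × String := ("axxbxcgh", "de")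

def Spec_add_items_to_inventory (inventory : String) (new_items : String) (out : String) : Prop := out = add_items_to_inventory_alt inventory new_items
instance (inventory : String) (new_items : String) (out : String) : Decidable (Spec_add_items_to_inventory inventory new_items out) := by unfold Spec_add_items_to_inventory; infer_instance

-- ===== CLAIM (what is proved, stated in full; the proofs are below) =====
def Claim_equal_add_items_to_inventory : Prop := ∀ (inventory : String) (new_items : String), Dom_add_items_to_inventory inventory new_items → Pre_add_items_to_inventory inventory new_items → Spec_add_items_to_inventory inventory new_items (add_items_to_inventory inventory new_items)

-- ===== LEMMAS AND PROOFS =====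

-- A's step function, abbreviated for the lemmas.
def pvStepA (acc : Option (List Char)) (item : Char) : Option (List Char) :=
  if item = 'x' then acc else acc.bind (fun l => pvLoopA 8 0 l item)

lemma pvFoldA_def (new : List Char) (acc : Option (List Char)) :
    new.foldl (fun acc item => if item = 'x' then acc
        else acc.bind (fun l => pvLoopA 8 0 l item)) acc = new.foldl pvStepA acc := rfl

-- filtering out 'x' items does not change A's fold (the step skips them)
lemma pvFoldA_filter (new : List Char) (acc : Option (List Char)) :
    new.foldl pvStepA acc = (new.filter (fun c => c ≠ 'x')).foldl pvStepA acc := by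
  induction new generalizing acc with
  | nil => rfl
  | cons hd tl ih =>
    by_cases h : hd = 'x' <;> simp [h, pvStepA, ih]

lemma pvFoldA_none (items : List Char) : items.foldl pvStepA none = none := by
  induction items with
  | nil => rfl
  | cons hd tl ih =>
    simp only [List.foldl_cons, pvStepA, ite_self, Option.bind_none]
    exact ih

-- pvLoopA skips a prefix of existing non-'x' slots
lemma pvLoopA_skip (d : Nat) : ∀ (fuel j : Nat) (inv : List Char) (it : Char),
    (∀ k, k < d → ∃ c, inv[j+k]? = some c ∧ c ≠ 'x') →
    pvLoopA (d + fuel) j inv it = pvLoopA fuel (j + d) inv it := by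
  induction d with
  | zero => intro fuel j inv it _; simp
  | succ d ih =>
    intro fuel j inv it h
    obtain ⟨c, hc, hcx⟩ := h 0 (Nat.succ_pos d)
    have e1 : d + 1 + fuel = (d + fuel) + 1 := by omega
    rw [e1]
    simp only [pvLoopA, Nat.add_zero] at *
    rw [hc]
    simp only [hcx, if_false]
    have := ih fuel (j+1) inv it (fun k hk => by
      have := h (k+1) (by omega)
      simpa [Nat.add_comm, Nat.add_assoc, Nat.add_left_comm] using this)
    rw [this]
    congr 1
    omega

-- with fuel's worth of existing non-'x' slots ahead, pvLoopA finds nothing and returns inv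
lemma pvLoopA_full (fuel : Nat) : ∀ (j : Nat) (inv : List Char) (it : Char),
    (∀ k, k < fuel → ∃ c, inv[j+k]? = some c ∧ c ≠ 'x') →
    pvLoopA fuel j inv it = some inv := by
  induction fuel with
  | zero => intro j inv it _; rfl
  | succ fuel ih =>
    intro j inv it h
    obtain ⟨c, hc, hcx⟩ := h 0 (Nat.succ_pos fuel)
    simp only [pvLoopA, Nat.add_zero] at *
    rw [hc]
    simp only [hcx, if_false]
    exact ih (j+1) inv it (fun k hk => by
      have := h (k+1) (by omega)
      simpa [Nat.add_comm, Nat.add_assoc, Nat.add_left_comm] using this)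

-- when all 8 slots exist and are non-'x', A's fold leaves inv untouched
lemma pvFoldA_full (items : List Char) (inv : List Char)
    (h : ∀ k, k < 8 → ∃ c, inv[k]? = some c ∧ c ≠ 'x') :
    items.foldl pvStepA (some inv) = some inv := by
  induction items with
  | nil => rfl
  | cons hd tl ih =>
    have hfull := pvLoopA_full 8 0 inv hd (fun k hk => by simpa using h k hk)
    simp [List.foldl_cons, pvStepA]
    split <;> simp [hfull, ih]

-- proof-only scan: A's fold, re-expressed as one indexed pass over the 8 slots
def pvScan : Nat → Nat → List Char → List Char → Option (List Char)
  | 0, _, inv, _ => some inv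
  | fuel+1, i, inv, items =>
    match items with
    | [] => some inv
    | it :: rest =>
      match inv[i]? with
      | none => none
      | some c =>
        if c = 'x' then pvScan fuel (i+1) (inv.set i it) rest
        else pvScan fuel (i+1) inv (it :: rest)

-- main invariant: A's fold over the remaining queue equals the indexed scan from i,
-- provided all slots before i exist and are non-'x'
lemma pvMain (fuel : Nat) : ∀ (i : Nat) (inv : List Char) (items : List Char),
    i + fuel = 8 →
    (∀ k, k < i → ∃ c, inv[k]? = some c ∧ c ≠ 'x') →
    (∀ it ∈ items, it ≠ 'x') →
    items.foldl pvStepA (some inv) = pvScan fuel i inv items := by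
  induction fuel with
  | zero =>
    intro i inv items hi h _
    have : i = 8 := by omega
    subst this
    exact pvFoldA_full items inv h
  | succ fuel ih =>
    intro i inv items hi h hitems
    match items with
    | [] => rfl
    | it :: rest =>
      have hit : it ≠ 'x' := hitems it (List.mem_cons_self ..)
      have hskip : pvLoopA 8 0 inv it = pvLoopA (fuel+1) i inv it := by
        have hs := pvLoopA_skip i (fuel+1) 0 inv it (fun k hk => by simpa using h k hk)
        simpa [hi] using hs
      have hstep : pvStepA (some inv) it = pvLoopA (fuel+1) i inv it := by
        simp [pvStepA, hit, hskip]
      rw [List.foldl_cons, hstep]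
      cases hc : inv[i]? with
      | none =>
        simp only [pvScan, pvLoopA, hc]
        exact pvFoldA_none rest
      | some c =>
        by_cases hcx : c = 'x'
        · have hval : pvLoopA (fuel+1) i inv it = some (inv.set i it) := by
            simp [pvLoopA, hc, hcx]
          rw [hval]
          simp only [pvScan, hc, hcx, if_true]
          exact ih (i+1) (inv.set i it) rest (by omega)
            (fun k hk => by
              by_cases hk' : k = i
              · subst hk'
                refine ⟨it, ?_, hit⟩
                have hlen : k < inv.length := (List.getElem?_eq_some_iff.mp hc).1
                rw [List.getElem?_set, if_pos rfl, if_pos hlen]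
              · have hki : k < i := by omega
                obtain ⟨c', hc', hcx'⟩ := h k hki
                refine ⟨c', ?_, hcx'⟩
                rw [List.getElem?_set, if_neg (fun e => hk' e.symm)]
                exact hc')
            (fun x hx => hitems x (List.mem_cons_of_mem _ hx))
        · simp only [pvScan, hc, hcx, if_false]
          rw [← ih (i+1) inv (it :: rest) (by omega)
              (fun k hk => by
                by_cases hk' : k = i
                · subst hk'; exact ⟨c, hc, hcx⟩
                · exact h k (by omega))
              hitems,
            List.foldl_cons, hstep]

lemma pvFillB_nil (l : List Char) : pvFillB l [] = l := by
  induction l with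
  | nil => rfl
  | cons hd tl ih => by_cases h : hd = 'x' <;> simp [pvFillB, h, ih]

-- bridge: the indexed scan never fails under Pre_'s condition, and returns B's fill
lemma pvScan_fill (fuel : Nat) : ∀ (i : Nat) (inv items : List Char),
    (i + fuel ≤ inv.length ∨ items.length ≤ ((inv.drop i).countP (fun c => c = 'x'))) →
    pvScan fuel i inv items
      = some (inv.take i ++ pvFillB ((inv.drop i).take fuel) items ++ inv.drop (i+fuel)) := by
  induction fuel with
  | zero =>
    intro i inv items _
    simp [pvScan, pvFillB]
  | succ fuel ih =>
    intro i inv items hpre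
    match items with
    | [] =>
      simp only [pvScan, pvFillB_nil]
      have h1 : inv.drop (i+(fuel+1)) = (inv.drop i).drop (fuel+1) := by
        rw [List.drop_drop]
      rw [h1, List.append_assoc, List.take_append_drop, List.take_append_drop]
    | it :: rest =>
      cases hc : inv[i]? with
      | none =>
        exfalso
        have hlen : inv.length ≤ i := by
          by_contra hlt
          exact absurd hc (by simp [List.getElem?_eq_getElem (by omega : i < inv.length)])
        rcases hpre with h1 | h2
        · omega
        · rw [List.drop_eq_nil_of_le hlen] at h2; simp at h2
      | some c =>
        have hlt : i < inv.length := (List.getElem?_eq_some_iff.mp hc).1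
        have hgd : inv[i] = c := by
          have := List.getElem?_eq_getElem hlt; rw [hc] at this; exact (Option.some_inj.mp this).symm
        have hdrop : inv.drop i = c :: inv.drop (i+1) := by
          rw [← List.getElem_cons_drop hlt, hgd]
        have harith : i + 1 + fuel = i + (fuel + 1) := by omega
        by_cases hcx : c = 'x'
        · simp only [pvScan, hc, hcx, if_true]
          have hset : inv.set i it = inv.take i ++ it :: inv.drop (i+1) := by
            rw [List.set_eq_take_append_cons_drop, if_pos hlt]
          rw [ih (i+1) (inv.set i it) rest ?side]
          · have ht : (inv.set i it).take (i+1) = inv.take i ++ [it] := by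
              rw [hset, List.take_append, List.length_take, Nat.min_eq_left hlt.le,
                List.take_of_length_le (by rw [List.length_take]; omega)]
              simp
            have hd2 : (inv.set i it).drop (i+1) = inv.drop (i+1) := by
              rw [List.drop_set, if_pos (by omega)]
            have hd3 : (inv.set i it).drop (i+1+fuel) = inv.drop (i+1+fuel) := by
              rw [List.drop_set, if_pos (by omega)]
            rw [ht, hd2, hd3, hdrop, harith]
            subst hcx
            simp [pvFillB, List.append_assoc]
          case side =>
            rcases hpre with h1 | h2
            · left; simp; omega
            · right
              have hd2 : (inv.set i it).drop (i+1) = inv.drop (i+1) := by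
                rw [List.drop_set, if_pos (by omega)]
              rw [hd2]
              rw [hdrop] at h2
              simp [hcx] at h2 ⊢
              omega
        · simp only [pvScan, hc, hcx, if_false]
          rw [ih (i+1) inv (it :: rest) ?side2]
          · have ht : inv.take (i+1) = inv.take i ++ [c] := by
              rw [List.take_add_one, hc]; rfl
            rw [ht, hdrop, harith]
            simp [pvFillB, hcx, List.append_assoc]
          case side2 =>
            rcases hpre with h1 | h2
            · left; omega
            · right
              rw [hdrop] at h2
              simp [hcx] at h2 ⊢
              omega

-- ===== VERDICT (by name: the statement is the Claim_ definition above) =====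
theorem add_items_to_inventory_spec : Claim_equal_add_items_to_inventory := by
  intro inventory new_items _ hpre
  unfold Spec_add_items_to_inventory add_items_to_inventory add_items_to_inventory_alt
  rw [pvFoldA_def, pvFoldA_filter,
    pvMain 8 0 inventory.toList (new_items.toList.filter (fun c => c ≠ 'x'))
      rfl (fun k hk => absurd hk (Nat.not_lt_zero k))
      (fun it hit => by simpa using (List.mem_filter.mp hit).2),
    pvScan_fill 8 0 inventory.toList _ ?pre]
  · simp
  case pre =>
    rcases hpre with h1 | h2
    · left; simpa using h1
    · right
      simpa [List.countP_eq_length_filter] using h2
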